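-- pv_equiv track=rewrite | github.com/pre63/drl-entropy | Zoo/Report.py | group_paths_by_env
-- ===== SOURCE A (Python) =====
-- from collections import defaultdict
--
-- def group_paths_by_env(paths):
--   grouped = defaultdict(list)
--   for path in paths:
--     # Extract environment name from the path
--     # Assuming environment name is the part before the last underscore in the second-to-last folder
--     parts = path.split("/")
--     if len(parts) > 2:
--       env_name = parts[-2].split("_")[0]
--       grouped[env_name].append(path)
--   return dict(grouped)
-- ===== SOURCE B (Python) =====
-- def group_paths_by_env(paths):
--   # Two-phase decomposition: first compute (env_key, path) pairs for eligible paths,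
--   # then build the dict per distinct key (first-occurrence order) by gathering.
--   keyed = []
--   for path in paths:
--     parts = path.split("/")
--     if len(parts) > 2:
--       keyed.append((parts[-2].split("_")[0], path))
--   keys = list(dict.fromkeys(k for k, _ in keyed))
--   return {k: [p for kk, p in keyed if kk == k] for k in keys}
-- ===== Notes on version B (the rewrite author's own statement) =====
-- stated objective: alternative
-- what changed: Replaces the single-pass defaultdict-append loop with a two-phase decomposition: first map/filter paths to (env_key, path) pairs, then dedup the keys in first-occurrence order and gather each group with a per-key comprehension.
import Mathlib
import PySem

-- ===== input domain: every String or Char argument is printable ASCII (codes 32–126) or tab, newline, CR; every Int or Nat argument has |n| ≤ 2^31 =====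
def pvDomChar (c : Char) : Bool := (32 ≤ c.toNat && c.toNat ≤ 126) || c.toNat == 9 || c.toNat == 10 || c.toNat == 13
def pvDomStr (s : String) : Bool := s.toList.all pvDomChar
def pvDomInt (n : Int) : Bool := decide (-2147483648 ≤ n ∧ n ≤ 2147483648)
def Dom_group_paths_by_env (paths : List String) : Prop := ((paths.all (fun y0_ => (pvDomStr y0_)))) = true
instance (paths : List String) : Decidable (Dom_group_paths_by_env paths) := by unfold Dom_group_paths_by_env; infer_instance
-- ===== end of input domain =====

-- B replaces A's one-pass defaultdict loop by a map/filter-then-gather decomposition (objective: alternative, same results).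

-- shared key extraction: parts[-2].split("_")[0] (split "_" is always nonempty, so [0] is its head;
-- parts[-2] is guarded by len(parts) > 2 at every use site, so the .getD "" default is never taken)
def pvEnvKey (parts : List String) : String :=
  ((PySem.Str.split? ((PySem.List.pyGet? parts (-2)).getD "") "_").getD []).headD ""

-- ===== PORT A =====
def group_paths_by_env (paths : List String) : List (String × List String) :=
  (paths.foldl (fun d p =>
      let parts := (PySem.Str.split? p "/").getD []
      if parts.length > 2 then d.modify (pvEnvKey parts) [] (fun l => l ++ [p]) else d)
    (PySem.Dict.empty : PySem.Dict String (List String))).items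

-- ===== PORT B =====
def pvKeyed (paths : List String) : List (String × String) :=
  paths.filterMap (fun p =>
    let parts := (PySem.Str.split? p "/").getD []
    if parts.length > 2 then some (pvEnvKey parts, p) else none)

def group_paths_by_env_alt (paths : List String) : List (String × List String) :=
  (PySem.List.dedup ((pvKeyed paths).map Prod.fst)).map
    (fun k => (k, ((pvKeyed paths).filter (fun kp => kp.1 == k)).map Prod.snd))

-- ===== PRECONDITION & SPEC =====
def Spec_group_paths_by_env (paths : List String) (out : List (String × List String)) : Prop := out = group_paths_by_env_alt paths
instance (paths : List String) (out : List (String × List String)) : Decidable (Spec_group_paths_by_env paths out) := by unfold Spec_group_paths_by_env; infer_instance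

-- ===== CLAIM (what is proved, stated in full; the proofs are below) =====
def Claim_equal_group_paths_by_env : Prop := ∀ (paths : List String), Dom_group_paths_by_env paths → Spec_group_paths_by_env paths (group_paths_by_env paths)

-- ===== LEMMAS AND PROOFS =====

-- A's grouping step, as a function of the precomputed (key, path) pair
def pvStep (d : PySem.Dict String (List String)) (kp : String × String) : PySem.Dict String (List String) :=
  d.modify kp.1 [] (fun l => l ++ [kp.2])

-- A's fold over paths is the same fold over the keyed pair list
theorem foldl_paths_eq_foldl_keyed (paths : List String) (d : PySem.Dict String (List String)) :
    paths.foldl (fun d p =>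
      let parts := (PySem.Str.split? p "/").getD []
      if parts.length > 2 then d.modify (pvEnvKey parts) [] (fun l => l ++ [p]) else d) d
    = (pvKeyed paths).foldl pvStep d := by
  induction paths generalizing d with
  | nil => rfl
  | cons p ps ih =>
    simp only [List.foldl_cons, pvKeyed, List.filterMap_cons]
    by_cases h : ((PySem.Str.split? p "/").getD []).length > 2
    · simp [h, pvStep, ih, pvKeyed]
    · simp [h, ih, pvKeyed]

theorem getD_foldl_step (l : List (String × String)) (d : PySem.Dict String (List String)) (k : String) :
    (l.foldl pvStep d).getD k [] = d.getD k [] ++ (l.filter (fun kp => kp.1 == k)).map Prod.snd := by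
  induction l generalizing d with
  | nil => simp
  | cons a l ih =>
    simp only [List.foldl_cons, List.filter_cons]
    by_cases h : a.1 = k
    · subst h
      simp [ih, pvStep, PySem.Dict.getD_modify_self]
    · have hne : k ≠ a.1 := fun hh => h hh.symm
      simp [ih, pvStep, PySem.Dict.getD_modify_of_ne _ _ _ hne, h]

theorem keys_modify (d : PySem.Dict String (List String)) (k : String) (f : List String → List String) :
    (d.modify k [] f).keys = if d.contains k then d.keys else d.keys ++ [k] := by
  simp only [PySem.Dict.modify, PySem.Dict.insert]
  split
  · simp only [PySem.Dict.keys, List.map_map]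
    apply List.map_congr_left
    intro p _
    by_cases h : p.1 = k <;> simp [h]
  · simp [PySem.Dict.keys]

theorem dedup_append_singleton (xs : List String) (x : String) :
    PySem.List.dedup (xs ++ [x]) = if x ∈ xs then PySem.List.dedup xs else PySem.List.dedup xs ++ [x] := by
  rw [show PySem.List.dedup (xs ++ [x]) = PySem.Set.add (PySem.List.dedup xs) x from by
        simp [PySem.List.dedup, PySem.Set.ofList, List.foldl_append],
      PySem.Set.add]
  by_cases h : x ∈ xs
  · simp [h]
  · simp [h]

theorem keys_foldl_step (l : List (String × String)) :
    (l.foldl pvStep (PySem.Dict.empty : PySem.Dict String (List String))).keys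
      = PySem.List.dedup (l.map Prod.fst) := by
  induction l using List.reverseRecOn with
  | nil => rfl
  | append_singleton l a ih =>
    rw [List.foldl_append, List.foldl_cons, List.foldl_nil, List.map_append,
      List.map_cons, List.map_nil, dedup_append_singleton]
    show (pvStep _ a).keys = _
    rw [pvStep, keys_modify, ih]
    by_cases h : a.1 ∈ l.map Prod.fst
    · have hc : (l.foldl pvStep (PySem.Dict.empty : PySem.Dict String (List String))).contains a.1 = true := by
        rw [PySem.Dict.contains_iff_mem_keys, ih, PySem.List.mem_dedup]
        exact h
      simp [hc, h]
    · have hc : ¬ (l.foldl pvStep (PySem.Dict.empty : PySem.Dict String (List String))).contains a.1 = true := by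
        rw [PySem.Dict.contains_iff_mem_keys, ih, PySem.List.mem_dedup]
        exact h
      simp [hc, h]

theorem items_foldl_step (l : List (String × String)) :
    (l.foldl pvStep (PySem.Dict.empty : PySem.Dict String (List String))).items
      = (PySem.List.dedup (l.map Prod.fst)).map
          (fun k => (k, (l.filter (fun kp => kp.1 == k)).map Prod.snd)) := by
  have hnd : (l.foldl pvStep (PySem.Dict.empty : PySem.Dict String (List String))).keys.Nodup := by
    rw [keys_foldl_step]; exact PySem.List.nodup_dedup _
  rw [PySem.Dict.items_eq_map_keys _ hnd ([] : List String), keys_foldl_step]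
  apply List.map_congr_left
  intro k _
  rw [getD_foldl_step]
  rfl

-- ===== VERDICT (by name: the statement is the Claim_ definition above) =====
theorem group_paths_by_env_spec : Claim_equal_group_paths_by_env := by
  intro paths _
  show group_paths_by_env paths = group_paths_by_env_alt paths
  rw [group_paths_by_env, foldl_paths_eq_foldl_keyed, items_foldl_step]
  rfl
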